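-- pv_equiv track=rewrite | github.com/AIdevsmartdata/crossed-cosmos | notes/eci_v7_aspiration/M173_OPUS_M169_EXTENSION/02_biquadratic_compositum.py | discriminant_mod_squares
-- ===== SOURCE A (Python) =====
-- def discriminant_mod_squares(D):
--     """Reduce |D| modulo (Q×)² by extracting all squared prime factors."""
--     n = abs(D)
--     sign = 1 if D > 0 else -1
--     sf = 1  # squarefree kernel
--     p = 2
--     while p * p <= n:
--         if n % (p * p) == 0:
--             while n % (p * p) == 0:
--                 n //= p * p
--             # now n may still have one factor of p
--         if n % p == 0:
--             sf *= p
--             n //= p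
--         p += 1
--     sf *= n  # remaining prime factor (if n > 1)
--     return sign * sf
-- ===== SOURCE B (Python) =====
-- def discriminant_mod_squares(D):
--     """Reduce |D| modulo (Q x)^2: divide |D| by its largest square divisor."""
--     n = abs(D)
--     sign = 1 if D > 0 else -1
--     best = 1
--     k = 1
--     while k * k <= n:
--         if n % (k * k) == 0:
--             best = k
--         k += 1
--     return sign * (n // (best * best))
-- ===== Notes on version B (the rewrite author's own statement) =====
-- stated objective: alternative
-- what changed: B never factors |D|: it searches k = 1..sqrt(|D|) for the largest k with k^2 dividing |D| (no mutation of n, no prime stripping, no accumulator of primes) and returns sign * |D| // k^2, relying on the fact that dividing by the largest square divisor yields the squarefree kernel.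
import Mathlib
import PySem

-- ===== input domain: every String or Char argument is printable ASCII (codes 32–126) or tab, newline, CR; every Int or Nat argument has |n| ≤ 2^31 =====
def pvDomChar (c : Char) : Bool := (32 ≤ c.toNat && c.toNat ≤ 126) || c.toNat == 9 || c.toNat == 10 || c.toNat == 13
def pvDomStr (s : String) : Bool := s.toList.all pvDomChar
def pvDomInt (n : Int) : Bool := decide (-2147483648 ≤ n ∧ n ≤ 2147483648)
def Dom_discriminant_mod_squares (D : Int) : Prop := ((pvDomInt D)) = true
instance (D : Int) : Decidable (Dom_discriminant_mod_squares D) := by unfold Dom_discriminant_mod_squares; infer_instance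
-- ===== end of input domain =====

-- B replaces A's prime-by-prime stripping with a search for the LARGEST square divisor
-- k^2 of |D| (k = 1..sqrt|D|, n never mutated) and a single division; same asymptotic cost.

-- ===== PORT A =====

-- termination lemma cited by the decreasing_by clauses of the ports
theorem pvTermDiv (n q : Int) (h2 : 2 ≤ q) (hn : 0 < n) :
    (PySem.Int.floordiv n q).toNat < n.toNat := by
  have hd : PySem.Int.floordiv n q = n / q :=
    PySem.Int.floordiv_eq_ediv_of_pos (by omega)
  have hlt : n / q < n := by
    rw [Int.ediv_lt_iff_lt_mul (by omega)]; nlinarith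
  have h0 : 0 ≤ n / q := Int.ediv_nonneg (by omega) (by omega)
  omega

-- inner 'while n % (p*p) == 0: n //= p*p' of A (the guards 2 ≤ p, 0 < n are totality guards,
-- always true at every actual call site)
def pvStripPairs (n p : Int) : Int :=
  if h : 2 ≤ p ∧ 0 < n ∧ PySem.Int.mod n (p * p) = 0 then
    pvStripPairs (PySem.Int.floordiv n (p * p)) p
  else n
termination_by n.toNat
decreasing_by exact pvTermDiv n (p * p) (by nlinarith [h.1]) h.2.1

-- bounds used for the termination of the outer loop (cited by pvLoopA's decreasing_by)
theorem pvStripPairs_bounds (n p : Int) (hn : 0 < n) (hp : 2 ≤ p) :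
    0 < pvStripPairs n p ∧ pvStripPairs n p ≤ n := by
  generalize hk : n.toNat = k
  induction k using Nat.strong_induction_on generalizing n with
  | _ k ih =>
    rw [pvStripPairs]
    split
    · rename_i hg
      have hp4 : (4:Int) ≤ p * p := by nlinarith
      have hd : PySem.Int.floordiv n (p * p) = n / (p * p) :=
        PySem.Int.floordiv_eq_ediv_of_pos (by omega)
      have hdvd : (p * p) ∣ n := by
        have := PySem.Int.mod_eq_emod_of_pos (a := n) (b := p * p) (by omega)
        exact Int.dvd_of_emod_eq_zero (by omega)
      have hq : n / (p * p) * (p * p) = n := Int.ediv_mul_cancel hdvd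
      have hpos : 0 < n / (p * p) := by nlinarith [hq]
      have hlt : n / (p * p) < n := by
        rw [Int.ediv_lt_iff_lt_mul (by omega)]; nlinarith
      have := ih (n / (p * p)).toNat (by omega) (n / (p * p)) hpos rfl
      rw [hd]; omega
    · omega

-- termination lemmas for the outer loop of A
theorem pvTermLoopA1 (n p : Int) (h : p * p ≤ n ∧ 2 ≤ p)
    (h1 : PySem.Int.mod (if PySem.Int.mod n (p * p) = 0 then pvStripPairs n p else n) p = 0) :
    (PySem.Int.floordiv (if PySem.Int.mod n (p * p) = 0 then pvStripPairs n p else n) p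
      - (p + 1)).toNat < (n - p).toNat := by
  have hn : 0 < n := by nlinarith [h.1, h.2]
  have hpn : p < n := by nlinarith [h.1, h.2]
  have hb : (if PySem.Int.mod n (p * p) = 0 then pvStripPairs n p else n) ≤ n ∧
      0 < (if PySem.Int.mod n (p * p) = 0 then pvStripPairs n p else n) := by
    split
    · have := pvStripPairs_bounds n p hn h.2; omega
    · omega
  set n1 := if PySem.Int.mod n (p * p) = 0 then pvStripPairs n p else n with hn1
  have hd : PySem.Int.floordiv n1 p = n1 / p :=
    PySem.Int.floordiv_eq_ediv_of_pos (by omega)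
  have : n1 / p ≤ n1 := Int.ediv_le_self _ (by omega)
  rw [hd]; omega

theorem pvTermLoopA2 (n p : Int) (h : p * p ≤ n ∧ 2 ≤ p) :
    ((if PySem.Int.mod n (p * p) = 0 then pvStripPairs n p else n) - (p + 1)).toNat
      < (n - p).toNat := by
  have hn : 0 < n := by nlinarith [h.1, h.2]
  have hpn : p < n := by nlinarith [h.1, h.2]
  have hb : (if PySem.Int.mod n (p * p) = 0 then pvStripPairs n p else n) ≤ n := by
    split
    · have := pvStripPairs_bounds n p hn h.2; omega
    · omega
  omega

-- outer while loop of A, state (n, sf, p); '2 ≤ p' is a totality guard (p starts at 2)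
def pvLoopA (n sf p : Int) : Int × Int :=
  if h : p * p ≤ n ∧ 2 ≤ p then
    let n1 := if PySem.Int.mod n (p * p) = 0 then pvStripPairs n p else n
    if PySem.Int.mod n1 p = 0 then
      pvLoopA (PySem.Int.floordiv n1 p) (sf * p) (p + 1)
    else
      pvLoopA n1 sf (p + 1)
  else (n, sf)
termination_by (n - p).toNat
decreasing_by
  · simp only [dite_eq_ite]; exact pvTermLoopA1 n p h (by simpa using ‹_›)
  · simp only [dite_eq_ite]; exact pvTermLoopA2 n p h

def discriminant_mod_squares (D : Int) : Int :=
  let n := |D|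
  let sign : Int := if D > 0 then 1 else -1
  let r := pvLoopA n 1 2
  sign * (r.2 * r.1)

-- ===== PORT B =====

-- termination lemma cited by pvLoopBest's decreasing_by
theorem pvTermLoopBest (n k : Int) (h : k * k ≤ n ∧ 1 ≤ k) :
    (n + 1 - (k + 1)).toNat < (n + 1 - k).toNat := by
  have : k ≤ n := le_trans (by nlinarith [h.2]) h.1
  omega

-- 'best = 1; k = 1; while k*k <= n: if n % (k*k) == 0: best = k; k += 1' of B
-- ('1 ≤ k' is a totality guard, true at every actual call site)
def pvLoopBest (n k best : Int) : Int :=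
  if h : k * k ≤ n ∧ 1 ≤ k then
    pvLoopBest n (k + 1) (if PySem.Int.mod n (k * k) = 0 then k else best)
  else best
termination_by (n + 1 - k).toNat
decreasing_by exact pvTermLoopBest n k h

def discriminant_mod_squares_alt (D : Int) : Int :=
  let n := |D|
  let sign : Int := if D > 0 then 1 else -1
  let best := pvLoopBest n 1 1
  sign * PySem.Int.floordiv n (best * best)

-- ===== PRECONDITION & SPEC =====
def Spec_discriminant_mod_squares (D : Int) (out : Int) : Prop := out = discriminant_mod_squares_alt D
instance (D : Int) (out : Int) : Decidable (Spec_discriminant_mod_squares D out) := by unfold Spec_discriminant_mod_squares; infer_instance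

-- ===== CLAIM (what is proved, stated in full; the proofs are below) =====
def Claim_equal_discriminant_mod_squares : Prop := ∀ (D : Int), Dom_discriminant_mod_squares D → Spec_discriminant_mod_squares D (discriminant_mod_squares D)

-- ===== LEMMAS AND PROOFS =====

-- uniqueness of the squarefree part of a positive natural number
theorem pvSqfUnique (s1 s2 m1 m2 : ℕ) (h1 : Squarefree s1) (h2 : Squarefree s2)
    (hm1 : m1 ≠ 0) (hm2 : m2 ≠ 0) (h : s1 * m1 ^ 2 = s2 * m2 ^ 2) : s1 = s2 := by
  apply Nat.eq_of_factorization_eq h1.ne_zero h2.ne_zero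
  intro p
  have hf := congrArg (fun x => x.factorization p) h
  simp only [Nat.factorization_mul h1.ne_zero (pow_ne_zero 2 hm1),
    Nat.factorization_mul h2.ne_zero (pow_ne_zero 2 hm2),
    Nat.factorization_pow, Finsupp.add_apply, Finsupp.smul_apply, smul_eq_mul] at hf
  have l1 := h1.natFactorization_le_one p
  have l2 := h2.natFactorization_le_one p
  omega

-- characterization of the pair-stripping loop of A
theorem pvStripPairs_char (n p : Int) (hn : 0 < n) (hp : 2 ≤ p) :
    ∃ a : ℕ, 0 < pvStripPairs n p ∧ pvStripPairs n p * (p ^ a) ^ 2 = n ∧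
      ¬ (p * p ∣ pvStripPairs n p) := by
  generalize hk : n.toNat = k
  induction k using Nat.strong_induction_on generalizing n with
  | _ k ih =>
    by_cases hg : 2 ≤ p ∧ 0 < n ∧ PySem.Int.mod n (p * p) = 0
    · rw [pvStripPairs, dif_pos hg]
      have hp4 : (4:Int) ≤ p * p := by nlinarith
      have hdvd : (p * p) ∣ n := (PySem.Int.mod_eq_zero_iff_dvd n (p * p)).1 hg.2.2
      obtain ⟨c, hc⟩ := hdvd
      have hd : PySem.Int.floordiv n (p * p) = n / (p * p) :=
        PySem.Int.floordiv_eq_ediv_of_pos (by omega)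
      have hnc : n / (p * p) = c := by rw [hc, Int.mul_ediv_cancel_left _ (by omega)]
      have hcpos : 0 < c := by nlinarith [hc]
      have hclt : c < n := by nlinarith [hc]
      rw [hd, hnc]
      obtain ⟨a, ha1, ha2, ha3⟩ := ih c.toNat (by omega) c hcpos rfl
      exact ⟨a + 1, ha1, by rw [hc]; linear_combination (p * p) * ha2, ha3⟩
    · rw [pvStripPairs, dif_neg hg]
      have hm : PySem.Int.mod n (p * p) ≠ 0 := fun hh => hg ⟨hp, hn, hh⟩
      exact ⟨0, hn, by ring, fun hdvd => hm ((PySem.Int.mod_eq_zero_iff_dvd n (p * p)).2 hdvd)⟩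

-- if every prime divisor of n is ≥ p and p itself divides n, then p is prime
theorem pvPrimeOfDvd (n p : Int) (hp : 2 ≤ p) (hn : 0 < n) (hdvd : p ∣ n)
    (hall : ∀ q : Int, Prime q → 0 ≤ q → q ∣ n → p ≤ q) : Prime p := by
  have hpn : p = ((p.toNat : ℕ) : Int) := by omega
  have hne1 : p.toNat ≠ 1 := by omega
  have hqp : Nat.Prime p.toNat.minFac := Nat.minFac_prime hne1
  have hdq : (p.toNat.minFac : Int) ∣ p := by
    rw [hpn]; exact_mod_cast Int.natCast_dvd_natCast.2 (Nat.minFac_dvd _)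
  have hle : p ≤ (p.toNat.minFac : Int) :=
    hall _ (Nat.prime_iff_prime_int.1 hqp) (by positivity) (hdq.trans hdvd)
  have hge : p.toNat.minFac ≤ p.toNat := Nat.minFac_le (by omega)
  have heq : p.toNat.minFac = p.toNat := by omega
  rw [hpn]
  exact Nat.prime_iff_prime_int.1 (heq ▸ hqp)

-- a squarefree positive integer times a prime not dividing it is squarefree
theorem pvSqfMulPrime (s p : Int) (hs : Squarefree s) (hp : Prime p) (hnd : ¬ p ∣ s) :
    Squarefree (s * p) := by
  rw [← Int.squarefree_natAbs, Int.natAbs_mul]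
  have hps : Nat.Prime p.natAbs := Int.prime_iff_natAbs_prime.1 hp
  have hnd' : ¬ p.natAbs ∣ s.natAbs := fun h => hnd (Int.natAbs_dvd_natAbs.1 h)
  exact Nat.squarefree_mul ((Nat.Prime.coprime_iff_not_dvd hps).2 hnd').symm
    |>.2 ⟨Int.squarefree_natAbs.2 hs, hps.squarefree⟩

-- at loop exit: a number > 1, all of whose prime divisors are ≥ p, with p*p > n, is prime
theorem pvResidualPrime (n p : Int) (hn : 2 ≤ n) (hp : 2 ≤ p) (hsmall : n < p * p)
    (hall : ∀ q : Int, Prime q → 0 ≤ q → q ∣ n → p ≤ q) : Prime n := by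
  have hnn : n = ((n.toNat : ℕ) : Int) := by omega
  have hq : Nat.Prime n.toNat.minFac := Nat.minFac_prime (by omega)
  obtain ⟨c, hc⟩ := Nat.minFac_dvd n.toNat
  have hdq : (n.toNat.minFac : Int) ∣ n := by
    rw [hnn]; exact_mod_cast Int.natCast_dvd_natCast.2 (Nat.minFac_dvd _)
  have hq_ge : p ≤ (n.toNat.minFac : Int) := hall _ (Nat.prime_iff_prime_int.1 hq) (by positivity) hdq
  rcases Nat.lt_or_ge 1 c with hc1 | hc1
  · -- c > 1: c has a prime factor ≥ p, so n ≥ minFac * r ≥ p*p > n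
    have hr : Nat.Prime c.minFac := Nat.minFac_prime (by omega)
    have hdr : (c.minFac : Int) ∣ n := by
      rw [hnn, hc]
      exact_mod_cast Int.natCast_dvd_natCast.2 (Dvd.dvd.mul_left (Nat.minFac_dvd c) _)
    have hr_ge : p ≤ (c.minFac : Int) := hall _ (Nat.prime_iff_prime_int.1 hr) (by positivity) hdr
    have hcr : c.minFac ≤ c := Nat.minFac_le (by omega)
    have : n.toNat ≥ n.toNat.minFac * c.minFac :=
      le_trans (Nat.mul_le_mul_left _ hcr) (le_of_eq hc.symm)
    have hcast : ((n.toNat.minFac * c.minFac : ℕ) : Int) ≤ n := by omega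
    push_cast at hcast
    nlinarith
  · -- c ≤ 1, so c = 1 (n > 0) and n = its least prime factor
    have hc0 : c = 1 := by
      rcases Nat.eq_zero_or_pos c with h0 | h1
      · exfalso; rw [h0, Nat.mul_zero] at hc; omega
      · omega
    rw [hc0, Nat.mul_one] at hc
    rw [hnn, hc]
    exact Nat.prime_iff_prime_int.1 hq

-- main invariant of A's outer loop
theorem pvLoopA_char (n sf p : Int) (hp : 2 ≤ p) (hn : 0 < n) (hsf : 0 < sf)
    (hsqf : Squarefree sf)
    (hsfp : ∀ q : Int, Prime q → 0 ≤ q → q ∣ sf → q < p)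
    (hnp : ∀ q : Int, Prime q → 0 ≤ q → q ∣ n → p ≤ q) :
    0 < (pvLoopA n sf p).1 ∧ 0 < (pvLoopA n sf p).2 ∧
      Squarefree ((pvLoopA n sf p).2 * (pvLoopA n sf p).1) ∧
      ∃ m : Int, 0 < m ∧ (pvLoopA n sf p).2 * (pvLoopA n sf p).1 * m ^ 2 = sf * n := by
  generalize hk : (n - p).toNat = K
  induction K using Nat.strong_induction_on generalizing n sf p with
  | _ K ih =>
    by_cases hg : p * p ≤ n ∧ 2 ≤ p
    · rw [pvLoopA, dif_pos hg]
      have hpn : p < n := by nlinarith [hg.1, hg.2]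
      have hn1ex : ∃ a : ℕ,
          0 < (if PySem.Int.mod n (p * p) = 0 then pvStripPairs n p else n) ∧
          (if PySem.Int.mod n (p * p) = 0 then pvStripPairs n p else n) * (p ^ a) ^ 2 = n ∧
          ¬ (p * p ∣ (if PySem.Int.mod n (p * p) = 0 then pvStripPairs n p else n)) := by
        split
        · exact pvStripPairs_char n p hn hg.2
        · rename_i hne
          exact ⟨0, hn, by ring,
            fun hd => hne ((PySem.Int.mod_eq_zero_iff_dvd n (p * p)).2 hd)⟩
      set n1 := if PySem.Int.mod n (p * p) = 0 then pvStripPairs n p else n with hdefn1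
      obtain ⟨a, hn1pos, hn1eq, hn1nsq⟩ := hn1ex
      have hn1dvd : n1 ∣ n := ⟨(p ^ a) ^ 2, hn1eq.symm⟩
      have hn1le : n1 ≤ n := Int.le_of_dvd hn hn1dvd
      have hn1p : ∀ q : Int, Prime q → 0 ≤ q → q ∣ n1 → p ≤ q :=
        fun q hq hq0 hd => hnp q hq hq0 (hd.trans hn1dvd)
      by_cases hm : PySem.Int.mod n1 p = 0
      · rw [if_pos hm]
        have hpd : p ∣ n1 := (PySem.Int.mod_eq_zero_iff_dvd n1 p).1 hm
        have hpprime : Prime p := pvPrimeOfDvd n1 p hg.2 hn1pos hpd hn1p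
        obtain ⟨c, hc⟩ := hpd
        have hfd : PySem.Int.floordiv n1 p = c := by
          rw [PySem.Int.floordiv_eq_ediv_of_pos (by omega), hc,
            Int.mul_ediv_cancel_left _ (by omega)]
        have hcpos : 0 < c := by nlinarith
        have hnops : ¬ p ∣ c := by
          rintro ⟨d, hd⟩
          exact hn1nsq ⟨d, by rw [hc, hd]; ring⟩
        have hcp : ∀ q : Int, Prime q → 0 ≤ q → q ∣ c → p + 1 ≤ q := by
          intro q hq hq0 hd
          have h1 : q ∣ n1 := by rw [hc]; exact Dvd.dvd.mul_left hd p
          have h2 := hn1p q hq hq0 h1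
          have hne : q ≠ p := fun he => hnops (he ▸ hd)
          omega
        have hpnsf : ¬ p ∣ sf :=
          fun hd => absurd (hsfp p hpprime (by omega) hd) (by omega)
        have hsf2 : Squarefree (sf * p) := pvSqfMulPrime sf p hsqf hpprime hpnsf
        have hsfp2 : ∀ q : Int, Prime q → 0 ≤ q → q ∣ sf * p → q < p + 1 := by
          intro q hq hq0 hd
          rcases hq.dvd_mul.mp hd with h | h
          · have := hsfp q hq hq0 h; omega
          · have hq' : Nat.Prime q.natAbs := Int.prime_iff_natAbs_prime.1 hq
            have hp' : Nat.Prime p.natAbs := Int.prime_iff_natAbs_prime.1 hpprime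
            have hqp : q.natAbs = p.natAbs :=
              (Nat.prime_dvd_prime_iff_eq hq' hp').1 (Int.natAbs_dvd_natAbs.2 h)
            omega
        have hcle : c ≤ n1 := by nlinarith
        obtain ⟨h1, h2, h3, m, hm0, hmeq⟩ :=
          ih (c - (p + 1)).toNat (by omega) c (sf * p) (p + 1) (by omega) hcpos
            (by positivity) hsf2 hsfp2 hcp rfl
        rw [hfd]
        refine ⟨h1, h2, h3, m * p ^ a, by positivity, ?_⟩
        linear_combination ((p : Int) ^ a) ^ 2 * hmeq + sf * hn1eq -
          sf * ((p : Int) ^ a) ^ 2 * hc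
      · rw [if_neg hm]
        have hnops : ¬ p ∣ n1 := fun hd => hm ((PySem.Int.mod_eq_zero_iff_dvd n1 p).2 hd)
        have hn1p' : ∀ q : Int, Prime q → 0 ≤ q → q ∣ n1 → p + 1 ≤ q := by
          intro q hq hq0 hd
          have h2 := hn1p q hq hq0 hd
          have hne : q ≠ p := fun he => hnops (he ▸ hd)
          omega
        obtain ⟨h1, h2, h3, m, hm0, hmeq⟩ :=
          ih (n1 - (p + 1)).toNat (by omega) n1 sf (p + 1) (by omega) hn1pos hsf hsqf
            (fun q hq hq0 hd => by have := hsfp q hq hq0 hd; omega) hn1p' rfl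
        refine ⟨h1, h2, h3, m * p ^ a, by positivity, ?_⟩
        linear_combination ((p : Int) ^ a) ^ 2 * hmeq + sf * hn1eq
    · rw [pvLoopA, dif_neg hg]
      have hpn2 : n < p * p := by
        rcases not_and_or.mp hg with h | h
        · omega
        · exact absurd hp h
      refine ⟨hn, hsf, ?_, 1, one_pos, by ring⟩
      rcases lt_or_ge n 2 with h1 | h2
      · have hone : n = 1 := by omega
        rw [hone, mul_one]; exact hsqf
      · have hnp' : Prime n := pvResidualPrime n p h2 hp hpn2 hnp
        apply pvSqfMulPrime sf n hsqf hnp'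
        intro hd
        have hlt := hsfp n hnp' (by omega) hd
        have hge := hnp n hnp' (by omega) dvd_rfl
        omega

-- invariant of B's loop: it returns the largest k with k*k dividing n
theorem pvLoopBest_char (n : Int) (hn : 0 < n) (k best : Int) (hb : 1 ≤ best)
    (hbk : best < k) (hbd : best * best ∣ n)
    (hmax : ∀ j : Int, best < j → j < k → ¬ (j * j ∣ n)) :
    1 ≤ pvLoopBest n k best ∧ pvLoopBest n k best * pvLoopBest n k best ∣ n ∧
      ∀ j : Int, 1 ≤ j → j * j ∣ n → j ≤ pvLoopBest n k best := by
  generalize hk : (n + 1 - k).toNat = K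
  induction K using Nat.strong_induction_on generalizing k best with
  | _ K ih =>
    by_cases hg : k * k ≤ n ∧ 1 ≤ k
    · rw [pvLoopBest, dif_pos hg]
      have hdec := pvTermLoopBest n k hg
      by_cases hm : PySem.Int.mod n (k * k) = 0
      · rw [if_pos hm]
        have hkd : k * k ∣ n := (PySem.Int.mod_eq_zero_iff_dvd n (k * k)).1 hm
        exact ih (n + 1 - (k + 1)).toNat (by omega) (k + 1) k (by omega) (by omega) hkd
          (fun j hj1 hj2 => ((by omega : False)).elim) rfl
      · rw [if_neg hm]
        apply ih (n + 1 - (k + 1)).toNat (by omega) (k + 1) best hb (by omega) hbd ?_ rfl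
        intro j hj1 hj2
        by_cases hjk : j = k
        · subst hjk
          exact fun hd => hm ((PySem.Int.mod_eq_zero_iff_dvd n (j * j)).2 hd)
        · exact hmax j hj1 (by omega)
    · rw [pvLoopBest, dif_neg hg]
      have hk1 : 1 ≤ k := by omega
      have hkn : n < k * k := by
        rcases not_and_or.mp hg with h | h
        · omega
        · exact absurd hk1 h
      refine ⟨hb, hbd, ?_⟩
      intro j hj hjd
      have hj2 : j * j ≤ n := Int.le_of_dvd hn hjd
      have hjk : j < k := by nlinarith
      by_contra hgt
      push_neg at hgt
      exact hmax j hgt hjk hjd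

-- the two ports both return 0 on D = 0 (the loops are skipped)
theorem pvA0 : discriminant_mod_squares 0 = 0 := by
  unfold discriminant_mod_squares
  dsimp only
  rw [pvLoopA]
  norm_num

theorem pvB0 : discriminant_mod_squares_alt 0 = 0 := by
  unfold discriminant_mod_squares_alt
  dsimp only
  rw [pvLoopBest]
  norm_num

-- ===== VERDICT (by name: the statement is the Claim_ definition above) =====
theorem discriminant_mod_squares_spec : Claim_equal_discriminant_mod_squares := by
  intro D _
  unfold Spec_discriminant_mod_squares
  by_cases hD : D = 0
  · subst hD; rw [pvA0, pvB0]
  · unfold discriminant_mod_squares discriminant_mod_squares_alt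
    dsimp only
    have hn : 0 < |D| := abs_pos.2 hD
    -- A-side characterization
    obtain ⟨hA1, hA2, hA3, m, hm0, hmeq⟩ :=
      pvLoopA_char |D| 1 2 (by norm_num) hn one_pos squarefree_one
        (fun q hq _ hd => absurd (isUnit_of_dvd_one hd) hq.not_unit)
        (fun q hq hq0 _ => by
          have := (Int.prime_iff_natAbs_prime.1 hq).two_le; omega)
    rw [one_mul] at hmeq
    -- B-side characterization
    have hunfold : pvLoopBest |D| 1 1 = pvLoopBest |D| 2 1 := by
      rw [pvLoopBest, dif_pos ⟨by omega, le_refl 1⟩,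
        if_pos ((PySem.Int.mod_eq_zero_iff_dvd |D| (1 * 1)).2 (by simpa using one_dvd |D|))]
      norm_num
    obtain ⟨hL1, hL2, hLmax⟩ :=
      pvLoopBest_char |D| hn 2 1 (le_refl 1) (by norm_num)
        (by simpa using one_dvd |D|) (fun j hj1 hj2 => ((by omega : False)).elim)
    set L := pvLoopBest |D| 2 1 with hdefL
    have hLL : 0 < L * L := by positivity
    obtain ⟨r, hr⟩ := hL2
    have hfd : PySem.Int.floordiv |D| (L * L) = r := by
      rw [PySem.Int.floordiv_eq_ediv_of_pos hLL, hr,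
        Int.mul_ediv_cancel_left _ (by omega)]
    have hrpos : 0 < r := by nlinarith
    have hrsf : Squarefree r := by
      rw [← Int.squarefree_natAbs, Nat.squarefree_iff_prime_squarefree]
      intro x hx hdd
      have hxd : ((x : Int)) * x ∣ r := by
        have h1 : ((x * x : ℕ) : Int) ∣ (r.natAbs : Int) := Int.natCast_dvd_natCast.2 hdd
        rw [Int.natAbs_of_nonneg (le_of_lt hrpos)] at h1
        push_cast at h1
        exact h1
      have hbig : (L * x) * (L * x) ∣ |D| := by
        obtain ⟨t, ht⟩ := hxd
        exact ⟨t, by rw [hr, ht]; ring⟩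
      have hx2 : (2 : Int) ≤ x := by exact_mod_cast hx.two_le
      have := hLmax (L * x) (by nlinarith) hbig
      nlinarith
    -- uniqueness of the squarefree part
    have hs1pos : 0 < (pvLoopA |D| 1 2).2 * (pvLoopA |D| 1 2).1 := mul_pos hA2 hA1
    have key : (pvLoopA |D| 1 2).2 * (pvLoopA |D| 1 2).1 = r := by
      have he : (pvLoopA |D| 1 2).2 * (pvLoopA |D| 1 2).1 * m ^ 2 = r * L ^ 2 := by
        rw [hmeq, hr]; ring
      have e1 : (((pvLoopA |D| 1 2).2 * (pvLoopA |D| 1 2).1) * m ^ 2).natAbs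
          = ((pvLoopA |D| 1 2).2 * (pvLoopA |D| 1 2).1).natAbs * m.natAbs ^ 2 := by
        rw [Int.natAbs_mul, Int.natAbs_pow]
      have e2 : (r * L ^ 2).natAbs = r.natAbs * L.natAbs ^ 2 := by
        rw [Int.natAbs_mul, Int.natAbs_pow]
      have hcast : ((pvLoopA |D| 1 2).2 * (pvLoopA |D| 1 2).1).natAbs * m.natAbs ^ 2
          = r.natAbs * L.natAbs ^ 2 := by
        rw [← e1, he, e2]
      have := pvSqfUnique _ _ _ _ (Int.squarefree_natAbs.2 hA3)
        (Int.squarefree_natAbs.2 hrsf) (by omega) (by omega) hcast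
      omega
    rw [hunfold, hfd, key]
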